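-- pv_equiv track=rewrite | github.com/BillChan226/SafeWatch | model_finetune/get_sft_data.py | aggregate_labels
-- ===== SOURCE A (Python) =====
-- def aggregate_labels(labels):
--     aggregated = {
--         "C1(Sexual Content)": False,
--         "C2(Harassment & Bullying)": False,
--         "C3(Threats, Violence & Harm)": False,
--         "C4(False & Deceptive Information)": False,
--         "C5(Illegal/Regulated Activities)": False,
--         "C6(Hateful Content & Extremism)": False,
--         # "C7(Religious & Ritual activities)": False
--     }
--     for label in labels:
--         if label.startswith("C1"):
--             aggregated["C1(Sexual Content)"] = True
--         elif label.startswith("C2"):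
--             aggregated["C2(Harassment & Bullying)"] = True
--         elif label.startswith("C3"):
--             aggregated["C3(Threats, Violence & Harm)"] = True
--         elif label.startswith("C4"):
--             aggregated["C4(False & Deceptive Information)"] = True
--         elif label.startswith("C5"):
--             aggregated["C5(Illegal/Regulated Activities)"] = True
--         elif label.startswith("C6"):
--             aggregated["C6(Hateful Content & Extremism)"] = True
--         # elif label.startswith("C7"):
--         #     aggregated["C7(Religious & Ritual activities)"] = True
--     return aggregated
-- ===== SOURCE B (Python) =====
-- def aggregate_labels(labels):
--     table = [
--         ("C1", "C1(Sexual Content)"),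
--         ("C2", "C2(Harassment & Bullying)"),
--         ("C3", "C3(Threats, Violence & Harm)"),
--         ("C4", "C4(False & Deceptive Information)"),
--         ("C5", "C5(Illegal/Regulated Activities)"),
--         ("C6", "C6(Hateful Content & Extremism)"),
--     ]
--     labels = list(labels)
--     return {key: any(label.startswith(prefix) for label in labels)
--             for prefix, key in table}
-- ===== Notes on version B (the rewrite author's own statement) =====
-- stated objective: alternative
-- what changed: Replaces A's single pass with a six-way if/elif chain mutating a flag dict by a fixed (prefix, key) table with one independent any-scan per category, valid because the six two-character prefixes are mutually exclusive.
import Mathlib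
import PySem

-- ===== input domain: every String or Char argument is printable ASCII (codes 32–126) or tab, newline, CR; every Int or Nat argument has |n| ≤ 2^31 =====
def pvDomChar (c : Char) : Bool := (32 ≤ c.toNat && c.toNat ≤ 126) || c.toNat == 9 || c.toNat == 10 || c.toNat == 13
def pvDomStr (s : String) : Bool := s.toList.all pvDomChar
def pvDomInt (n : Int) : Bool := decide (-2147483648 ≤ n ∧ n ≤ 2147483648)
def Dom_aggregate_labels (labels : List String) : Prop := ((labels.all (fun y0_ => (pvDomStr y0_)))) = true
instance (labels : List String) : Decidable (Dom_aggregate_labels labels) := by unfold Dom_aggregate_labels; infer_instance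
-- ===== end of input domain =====

-- B replaces A's single branched pass that mutates a flag dict with six independent
-- per-category `any` scans over a fixed (prefix, key) table (objective: alternative).

-- ===== PORT A =====
-- one iteration of A's for-loop (the if/elif chain over one label)
def pvStepA (d : PySem.Dict String Bool) (label : String) : PySem.Dict String Bool :=
  if PySem.Str.startswith label "C1" then d.insert "C1(Sexual Content)" true
  else if PySem.Str.startswith label "C2" then d.insert "C2(Harassment & Bullying)" true
  else if PySem.Str.startswith label "C3" then d.insert "C3(Threats, Violence & Harm)" true
  else if PySem.Str.startswith label "C4" then d.insert "C4(False & Deceptive Information)" true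
  else if PySem.Str.startswith label "C5" then d.insert "C5(Illegal/Regulated Activities)" true
  else if PySem.Str.startswith label "C6" then d.insert "C6(Hateful Content & Extremism)" true
  else d

def aggregate_labels (labels : List String) : List (String × Bool) :=
  (labels.foldl pvStepA (PySem.Dict.ofList
    [("C1(Sexual Content)", false), ("C2(Harassment & Bullying)", false),
     ("C3(Threats, Violence & Harm)", false), ("C4(False & Deceptive Information)", false),
     ("C5(Illegal/Regulated Activities)", false), ("C6(Hateful Content & Extremism)", false)])).items

-- ===== PORT B =====
def pvTable : List (String × String) :=
  [("C1", "C1(Sexual Content)"), ("C2", "C2(Harassment & Bullying)"),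
   ("C3", "C3(Threats, Violence & Harm)"), ("C4", "C4(False & Deceptive Information)"),
   ("C5", "C5(Illegal/Regulated Activities)"), ("C6", "C6(Hateful Content & Extremism)")]

def aggregate_labels_alt (labels : List String) : List (String × Bool) :=
  pvTable.map (fun pk => (pk.2, labels.any (fun label => PySem.Str.startswith label pk.1)))

-- ===== PRECONDITION & SPEC =====
def Spec_aggregate_labels (labels : List String) (out : List (String × Bool)) : Prop := out = aggregate_labels_alt labels
instance (labels : List String) (out : List (String × Bool)) : Decidable (Spec_aggregate_labels labels out) := by unfold Spec_aggregate_labels; infer_instance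

-- ===== CLAIM (what is proved, stated in full; the proofs are below) =====
def Claim_equal_aggregate_labels : Prop := ∀ (labels : List String), Dom_aggregate_labels labels → Spec_aggregate_labels labels (aggregate_labels labels)

-- ===== LEMMAS AND PROOFS =====

-- two distinct two-character prefixes "Cx" / "Cy" cannot both be prefixes of the same string
theorem pv_startswith_excl (l : String) (x y : Char) (hxy : x ≠ y)
    (h : PySem.Chars.startswith l.toList ['C', x] = true) :
    PySem.Chars.startswith l.toList ['C', y] = false := by
  rw [PySem.Chars.startswith_iff] at h
  obtain ⟨t, ht⟩ := h
  rw [← ht, Bool.eq_false_iff]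
  intro hc
  rw [PySem.Chars.startswith_iff] at hc
  simp [List.cons_prefix_cons] at hc
  exact hxy hc.symm

-- the loop invariant: folding A's step over labels from an arbitrary six-flag state
theorem pv_loop (labels : List String) (b1 b2 b3 b4 b5 b6 : Bool) :
    labels.foldl pvStepA (PySem.Dict.mk [("C1(Sexual Content)", b1), ("C2(Harassment & Bullying)", b2), ("C3(Threats, Violence & Harm)", b3), ("C4(False & Deceptive Information)", b4), ("C5(Illegal/Regulated Activities)", b5), ("C6(Hateful Content & Extremism)", b6)]) =
    (PySem.Dict.mk [("C1(Sexual Content)", b1 || labels.any (fun l => PySem.Str.startswith l "C1")), ("C2(Harassment & Bullying)", b2 || labels.any (fun l => PySem.Str.startswith l "C2")), ("C3(Threats, Violence & Harm)", b3 || labels.any (fun l => PySem.Str.startswith l "C3")), ("C4(False & Deceptive Information)", b4 || labels.any (fun l => PySem.Str.startswith l "C4")), ("C5(Illegal/Regulated Activities)", b5 || labels.any (fun l => PySem.Str.startswith l "C5")), ("C6(Hateful Content & Extremism)", b6 || labels.any (fun l => PySem.Str.startswith l "C6"))]) := by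
  induction labels generalizing b1 b2 b3 b4 b5 b6 with
  | nil => simp
  | cons l rest ih =>
    rw [List.foldl_cons]
    by_cases h1 : PySem.Str.startswith l "C1" = true
    · have hc1 : PySem.Chars.startswith l.toList ['C', '1'] = true := by
        rw [PySem.Str.startswith_eq, show ("C1" : String).toList = ['C', '1'] from by decide] at h1; exact h1
      have hc2 : PySem.Chars.startswith l.toList ['C', '2'] = false := pv_startswith_excl l '1' '2' (by decide) hc1
      have hc3 : PySem.Chars.startswith l.toList ['C', '3'] = false := pv_startswith_excl l '1' '3' (by decide) hc1
      have hc4 : PySem.Chars.startswith l.toList ['C', '4'] = false := pv_startswith_excl l '1' '4' (by decide) hc1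
      have hc5 : PySem.Chars.startswith l.toList ['C', '5'] = false := pv_startswith_excl l '1' '5' (by decide) hc1
      have hc6 : PySem.Chars.startswith l.toList ['C', '6'] = false := pv_startswith_excl l '1' '6' (by decide) hc1
      have hstep : pvStepA (PySem.Dict.mk [("C1(Sexual Content)", b1), ("C2(Harassment & Bullying)", b2), ("C3(Threats, Violence & Harm)", b3), ("C4(False & Deceptive Information)", b4), ("C5(Illegal/Regulated Activities)", b5), ("C6(Hateful Content & Extremism)", b6)]) l = (PySem.Dict.mk [("C1(Sexual Content)", true), ("C2(Harassment & Bullying)", b2), ("C3(Threats, Violence & Harm)", b3), ("C4(False & Deceptive Information)", b4), ("C5(Illegal/Regulated Activities)", b5), ("C6(Hateful Content & Extremism)", b6)]) := by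
        simp [pvStepA, PySem.Dict.insert, PySem.Dict.contains, hc1]
      rw [hstep, ih]
      simp [hc1, hc2, hc3, hc4, hc5, hc6]
    by_cases h2 : PySem.Str.startswith l "C2" = true
    · have hc2 : PySem.Chars.startswith l.toList ['C', '2'] = true := by
        rw [PySem.Str.startswith_eq, show ("C2" : String).toList = ['C', '2'] from by decide] at h2; exact h2
      have hc1 : PySem.Chars.startswith l.toList ['C', '1'] = false := by
        rw [PySem.Str.startswith_eq, show ("C1" : String).toList = ['C', '1'] from by decide] at h1
        exact Bool.eq_false_iff.mpr h1
      have hc3 : PySem.Chars.startswith l.toList ['C', '3'] = false := pv_startswith_excl l '2' '3' (by decide) hc2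
      have hc4 : PySem.Chars.startswith l.toList ['C', '4'] = false := pv_startswith_excl l '2' '4' (by decide) hc2
      have hc5 : PySem.Chars.startswith l.toList ['C', '5'] = false := pv_startswith_excl l '2' '5' (by decide) hc2
      have hc6 : PySem.Chars.startswith l.toList ['C', '6'] = false := pv_startswith_excl l '2' '6' (by decide) hc2
      have hstep : pvStepA (PySem.Dict.mk [("C1(Sexual Content)", b1), ("C2(Harassment & Bullying)", b2), ("C3(Threats, Violence & Harm)", b3), ("C4(False & Deceptive Information)", b4), ("C5(Illegal/Regulated Activities)", b5), ("C6(Hateful Content & Extremism)", b6)]) l = (PySem.Dict.mk [("C1(Sexual Content)", b1), ("C2(Harassment & Bullying)", true), ("C3(Threats, Violence & Harm)", b3), ("C4(False & Deceptive Information)", b4), ("C5(Illegal/Regulated Activities)", b5), ("C6(Hateful Content & Extremism)", b6)]) := by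
        simp [pvStepA, PySem.Dict.insert, PySem.Dict.contains, hc1, hc2]
      rw [hstep, ih]
      simp [hc1, hc2, hc3, hc4, hc5, hc6]
    by_cases h3 : PySem.Str.startswith l "C3" = true
    · have hc3 : PySem.Chars.startswith l.toList ['C', '3'] = true := by
        rw [PySem.Str.startswith_eq, show ("C3" : String).toList = ['C', '3'] from by decide] at h3; exact h3
      have hc1 : PySem.Chars.startswith l.toList ['C', '1'] = false := by
        rw [PySem.Str.startswith_eq, show ("C1" : String).toList = ['C', '1'] from by decide] at h1
        exact Bool.eq_false_iff.mpr h1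
      have hc2 : PySem.Chars.startswith l.toList ['C', '2'] = false := by
        rw [PySem.Str.startswith_eq, show ("C2" : String).toList = ['C', '2'] from by decide] at h2
        exact Bool.eq_false_iff.mpr h2
      have hc4 : PySem.Chars.startswith l.toList ['C', '4'] = false := pv_startswith_excl l '3' '4' (by decide) hc3
      have hc5 : PySem.Chars.startswith l.toList ['C', '5'] = false := pv_startswith_excl l '3' '5' (by decide) hc3
      have hc6 : PySem.Chars.startswith l.toList ['C', '6'] = false := pv_startswith_excl l '3' '6' (by decide) hc3
      have hstep : pvStepA (PySem.Dict.mk [("C1(Sexual Content)", b1), ("C2(Harassment & Bullying)", b2), ("C3(Threats, Violence & Harm)", b3), ("C4(False & Deceptive Information)", b4), ("C5(Illegal/Regulated Activities)", b5), ("C6(Hateful Content & Extremism)", b6)]) l = (PySem.Dict.mk [("C1(Sexual Content)", b1), ("C2(Harassment & Bullying)", b2), ("C3(Threats, Violence & Harm)", true), ("C4(False & Deceptive Information)", b4), ("C5(Illegal/Regulated Activities)", b5), ("C6(Hateful Content & Extremism)", b6)]) := by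
        simp [pvStepA, PySem.Dict.insert, PySem.Dict.contains, hc1, hc2, hc3]
      rw [hstep, ih]
      simp [hc1, hc2, hc3, hc4, hc5, hc6]
    by_cases h4 : PySem.Str.startswith l "C4" = true
    · have hc4 : PySem.Chars.startswith l.toList ['C', '4'] = true := by
        rw [PySem.Str.startswith_eq, show ("C4" : String).toList = ['C', '4'] from by decide] at h4; exact h4
      have hc1 : PySem.Chars.startswith l.toList ['C', '1'] = false := by
        rw [PySem.Str.startswith_eq, show ("C1" : String).toList = ['C', '1'] from by decide] at h1
        exact Bool.eq_false_iff.mpr h1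
      have hc2 : PySem.Chars.startswith l.toList ['C', '2'] = false := by
        rw [PySem.Str.startswith_eq, show ("C2" : String).toList = ['C', '2'] from by decide] at h2
        exact Bool.eq_false_iff.mpr h2
      have hc3 : PySem.Chars.startswith l.toList ['C', '3'] = false := by
        rw [PySem.Str.startswith_eq, show ("C3" : String).toList = ['C', '3'] from by decide] at h3
        exact Bool.eq_false_iff.mpr h3
      have hc5 : PySem.Chars.startswith l.toList ['C', '5'] = false := pv_startswith_excl l '4' '5' (by decide) hc4
      have hc6 : PySem.Chars.startswith l.toList ['C', '6'] = false := pv_startswith_excl l '4' '6' (by decide) hc4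
      have hstep : pvStepA (PySem.Dict.mk [("C1(Sexual Content)", b1), ("C2(Harassment & Bullying)", b2), ("C3(Threats, Violence & Harm)", b3), ("C4(False & Deceptive Information)", b4), ("C5(Illegal/Regulated Activities)", b5), ("C6(Hateful Content & Extremism)", b6)]) l = (PySem.Dict.mk [("C1(Sexual Content)", b1), ("C2(Harassment & Bullying)", b2), ("C3(Threats, Violence & Harm)", b3), ("C4(False & Deceptive Information)", true), ("C5(Illegal/Regulated Activities)", b5), ("C6(Hateful Content & Extremism)", b6)]) := by
        simp [pvStepA, PySem.Dict.insert, PySem.Dict.contains, hc1, hc2, hc3, hc4]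
      rw [hstep, ih]
      simp [hc1, hc2, hc3, hc4, hc5, hc6]
    by_cases h5 : PySem.Str.startswith l "C5" = true
    · have hc5 : PySem.Chars.startswith l.toList ['C', '5'] = true := by
        rw [PySem.Str.startswith_eq, show ("C5" : String).toList = ['C', '5'] from by decide] at h5; exact h5
      have hc1 : PySem.Chars.startswith l.toList ['C', '1'] = false := by
        rw [PySem.Str.startswith_eq, show ("C1" : String).toList = ['C', '1'] from by decide] at h1
        exact Bool.eq_false_iff.mpr h1
      have hc2 : PySem.Chars.startswith l.toList ['C', '2'] = false := by
        rw [PySem.Str.startswith_eq, show ("C2" : String).toList = ['C', '2'] from by decide] at h2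
        exact Bool.eq_false_iff.mpr h2
      have hc3 : PySem.Chars.startswith l.toList ['C', '3'] = false := by
        rw [PySem.Str.startswith_eq, show ("C3" : String).toList = ['C', '3'] from by decide] at h3
        exact Bool.eq_false_iff.mpr h3
      have hc4 : PySem.Chars.startswith l.toList ['C', '4'] = false := by
        rw [PySem.Str.startswith_eq, show ("C4" : String).toList = ['C', '4'] from by decide] at h4
        exact Bool.eq_false_iff.mpr h4
      have hc6 : PySem.Chars.startswith l.toList ['C', '6'] = false := pv_startswith_excl l '5' '6' (by decide) hc5
      have hstep : pvStepA (PySem.Dict.mk [("C1(Sexual Content)", b1), ("C2(Harassment & Bullying)", b2), ("C3(Threats, Violence & Harm)", b3), ("C4(False & Deceptive Information)", b4), ("C5(Illegal/Regulated Activities)", b5), ("C6(Hateful Content & Extremism)", b6)]) l = (PySem.Dict.mk [("C1(Sexual Content)", b1), ("C2(Harassment & Bullying)", b2), ("C3(Threats, Violence & Harm)", b3), ("C4(False & Deceptive Information)", b4), ("C5(Illegal/Regulated Activities)", true), ("C6(Hateful Content & Extremism)", b6)]) := by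
        simp [pvStepA, PySem.Dict.insert, PySem.Dict.contains, hc1, hc2, hc3, hc4, hc5]
      rw [hstep, ih]
      simp [hc1, hc2, hc3, hc4, hc5, hc6]
    by_cases h6 : PySem.Str.startswith l "C6" = true
    · have hc6 : PySem.Chars.startswith l.toList ['C', '6'] = true := by
        rw [PySem.Str.startswith_eq, show ("C6" : String).toList = ['C', '6'] from by decide] at h6; exact h6
      have hc1 : PySem.Chars.startswith l.toList ['C', '1'] = false := by
        rw [PySem.Str.startswith_eq, show ("C1" : String).toList = ['C', '1'] from by decide] at h1
        exact Bool.eq_false_iff.mpr h1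
      have hc2 : PySem.Chars.startswith l.toList ['C', '2'] = false := by
        rw [PySem.Str.startswith_eq, show ("C2" : String).toList = ['C', '2'] from by decide] at h2
        exact Bool.eq_false_iff.mpr h2
      have hc3 : PySem.Chars.startswith l.toList ['C', '3'] = false := by
        rw [PySem.Str.startswith_eq, show ("C3" : String).toList = ['C', '3'] from by decide] at h3
        exact Bool.eq_false_iff.mpr h3
      have hc4 : PySem.Chars.startswith l.toList ['C', '4'] = false := by
        rw [PySem.Str.startswith_eq, show ("C4" : String).toList = ['C', '4'] from by decide] at h4
        exact Bool.eq_false_iff.mpr h4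
      have hc5 : PySem.Chars.startswith l.toList ['C', '5'] = false := by
        rw [PySem.Str.startswith_eq, show ("C5" : String).toList = ['C', '5'] from by decide] at h5
        exact Bool.eq_false_iff.mpr h5
      have hstep : pvStepA (PySem.Dict.mk [("C1(Sexual Content)", b1), ("C2(Harassment & Bullying)", b2), ("C3(Threats, Violence & Harm)", b3), ("C4(False & Deceptive Information)", b4), ("C5(Illegal/Regulated Activities)", b5), ("C6(Hateful Content & Extremism)", b6)]) l = (PySem.Dict.mk [("C1(Sexual Content)", b1), ("C2(Harassment & Bullying)", b2), ("C3(Threats, Violence & Harm)", b3), ("C4(False & Deceptive Information)", b4), ("C5(Illegal/Regulated Activities)", b5), ("C6(Hateful Content & Extremism)", true)]) := by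
        simp [pvStepA, PySem.Dict.insert, PySem.Dict.contains, hc1, hc2, hc3, hc4, hc5, hc6]
      rw [hstep, ih]
      simp [hc1, hc2, hc3, hc4, hc5, hc6]
    · have hc1 : PySem.Chars.startswith l.toList ['C', '1'] = false := by
        rw [PySem.Str.startswith_eq, show ("C1" : String).toList = ['C', '1'] from by decide] at h1
        exact Bool.eq_false_iff.mpr h1
      have hc2 : PySem.Chars.startswith l.toList ['C', '2'] = false := by
        rw [PySem.Str.startswith_eq, show ("C2" : String).toList = ['C', '2'] from by decide] at h2
        exact Bool.eq_false_iff.mpr h2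
      have hc3 : PySem.Chars.startswith l.toList ['C', '3'] = false := by
        rw [PySem.Str.startswith_eq, show ("C3" : String).toList = ['C', '3'] from by decide] at h3
        exact Bool.eq_false_iff.mpr h3
      have hc4 : PySem.Chars.startswith l.toList ['C', '4'] = false := by
        rw [PySem.Str.startswith_eq, show ("C4" : String).toList = ['C', '4'] from by decide] at h4
        exact Bool.eq_false_iff.mpr h4
      have hc5 : PySem.Chars.startswith l.toList ['C', '5'] = false := by
        rw [PySem.Str.startswith_eq, show ("C5" : String).toList = ['C', '5'] from by decide] at h5
        exact Bool.eq_false_iff.mpr h5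
      have hc6 : PySem.Chars.startswith l.toList ['C', '6'] = false := by
        rw [PySem.Str.startswith_eq, show ("C6" : String).toList = ['C', '6'] from by decide] at h6
        exact Bool.eq_false_iff.mpr h6
      have hstep : pvStepA (PySem.Dict.mk [("C1(Sexual Content)", b1), ("C2(Harassment & Bullying)", b2), ("C3(Threats, Violence & Harm)", b3), ("C4(False & Deceptive Information)", b4), ("C5(Illegal/Regulated Activities)", b5), ("C6(Hateful Content & Extremism)", b6)]) l = (PySem.Dict.mk [("C1(Sexual Content)", b1), ("C2(Harassment & Bullying)", b2), ("C3(Threats, Violence & Harm)", b3), ("C4(False & Deceptive Information)", b4), ("C5(Illegal/Regulated Activities)", b5), ("C6(Hateful Content & Extremism)", b6)]) := by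
        simp [pvStepA, hc1, hc2, hc3, hc4, hc5, hc6]
      rw [hstep, ih]
      simp [hc1, hc2, hc3, hc4, hc5, hc6]

-- ===== VERDICT (by name: the statement is the Claim_ definition above) =====
theorem aggregate_labels_spec : Claim_equal_aggregate_labels := by
  intro labels _
  show aggregate_labels labels = aggregate_labels_alt labels
  unfold aggregate_labels aggregate_labels_alt pvTable
  rw [show (PySem.Dict.ofList
    [("C1(Sexual Content)", false), ("C2(Harassment & Bullying)", false),
     ("C3(Threats, Violence & Harm)", false), ("C4(False & Deceptive Information)", false),
     ("C5(Illegal/Regulated Activities)", false), ("C6(Hateful Content & Extremism)", false)]) =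
    PySem.Dict.mk
    [("C1(Sexual Content)", false), ("C2(Harassment & Bullying)", false),
     ("C3(Threats, Violence & Harm)", false), ("C4(False & Deceptive Information)", false),
     ("C5(Illegal/Regulated Activities)", false), ("C6(Hateful Content & Extremism)", false)]
    from by decide, pv_loop]
  simp
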